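-- pv_equiv track=rewrite | github.com/vishalvijayjain/dsa | removeElement.py | re
-- ===== SOURCE A (Python) =====
-- def re(nums: list[int], k: int) -> list[int]:
--     res = []
--     for num in nums:
--         if num != k:
--             res.append(num)
--     for i in range(len(res)):
--         nums[i] = res[i]
--     return res
-- ===== SOURCE B (Python) =====
-- def re(nums: list[int], k: int) -> list[int]:
--     j = 0
--     for num in nums:
--         if num != k:
--             nums[j] = num
--             j += 1
--     return nums[:j]
-- ===== Notes on version B (the rewrite author's own statement) =====
-- stated objective: idiomatic
-- what changed: Single in-place two-pointer pass with a write index replacing the intermediate res list and the second copy loop; returns nums[:j].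
import Mathlib
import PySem

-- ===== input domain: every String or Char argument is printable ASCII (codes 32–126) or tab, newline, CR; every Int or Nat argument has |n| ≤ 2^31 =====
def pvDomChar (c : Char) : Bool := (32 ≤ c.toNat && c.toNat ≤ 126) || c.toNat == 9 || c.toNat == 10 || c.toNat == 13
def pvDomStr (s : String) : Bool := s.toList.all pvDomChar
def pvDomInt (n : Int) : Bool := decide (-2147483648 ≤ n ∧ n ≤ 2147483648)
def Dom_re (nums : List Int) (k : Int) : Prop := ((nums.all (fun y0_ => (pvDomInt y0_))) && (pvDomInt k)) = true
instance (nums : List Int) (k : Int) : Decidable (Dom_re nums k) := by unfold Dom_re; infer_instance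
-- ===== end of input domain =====

-- B replaces A's intermediate res list + copy-back loop with one in-place two-pointer pass (idiomatic).
-- Both Pythons mutate nums identically (positions 0..len(result) get the kept elements); the
-- equivalence proved here is about the RETURN value.

-- ===== PORT A =====
-- A: build res by appending every num ≠ k, then copy res back into nums (mutation, not part of
-- the return value), return res.
def re (nums : List Int) (k : Int) : List Int :=
  nums.foldl (fun res num => if num ≠ k then res ++ [num] else res) []

-- ===== PORT B =====
-- B: one pass with state (nums, j); when num ≠ k write nums[j] := num and bump j; return nums[:j].
def re_alt (nums : List Int) (k : Int) : List Int :=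
  let st := nums.foldl
    (fun (st : List Int × Nat) num =>
      if num ≠ k then (st.1.set st.2 num, st.2 + 1) else st)
    (nums, 0)
  st.1.take st.2   -- nums[:j] with 0 ≤ j ≤ len(nums)

-- ===== PRECONDITION & SPEC =====
def Spec_re (nums : List Int) (k : Int) (out : List Int) : Prop := out = re_alt nums k
instance (nums : List Int) (k : Int) (out : List Int) : Decidable (Spec_re nums k out) := by unfold Spec_re; infer_instance

-- ===== CLAIM (what is proved, stated in full; the proofs are below) =====
def Claim_equal_re : Prop := ∀ (nums : List Int) (k : Int), Dom_re nums k → Spec_re nums k (re nums k)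

-- ===== LEMMAS AND PROOFS =====

-- Invariant for B's loop: as long as the kept elements still fit after the write index j,
-- taking j' from the final array yields arr.take j followed by the kept elements of xs.
theorem re_alt_loop_take (k : Int) (xs : List Int) :
    ∀ (arr : List Int) (j : Nat),
      j + (xs.filter (fun n => n ≠ k)).length ≤ arr.length →
      (let st := xs.foldl
        (fun (st : List Int × Nat) num =>
          if num ≠ k then (st.1.set st.2 num, st.2 + 1) else st) (arr, j)
       st.1.take st.2) = arr.take j ++ xs.filter (fun n => n ≠ k) := by
  induction xs with
  | nil => intro arr j _; simp
  | cons x xs ih =>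
    intro arr j h
    by_cases hx : x = k
    · simpa [hx] using ih arr j (by simpa [hx] using h)
    · have hf : ((x :: xs).filter (fun n => decide (n ≠ k))).length
          = (xs.filter (fun n => decide (n ≠ k))).length + 1 := by
        simp [hx]
      have hj : j < arr.length := by omega
      have hlen : (j + 1) + (xs.filter (fun n => decide (n ≠ k))).length ≤ (arr.set j x).length := by
        simp only [List.length_set]; omega
      have hstep : (arr.set j x).take (j + 1) = arr.take j ++ [x] := by
        rw [List.take_add_one]
        congr 1
        · exact List.take_set_of_le (le_refl j)
        · simp [hj]
      simp only [List.foldl_cons, if_pos hx, List.filter_cons]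
      rw [ih (arr.set j x) (j + 1) hlen, hstep]
      simp [hx]
-- ===== VERDICT (by name: the statement is the Claim_ definition above) =====
theorem re_spec : Claim_equal_re := by
  intro nums k _
  unfold Spec_re re re_alt
  rw [PySem.List.foldl_append_ite_eq_filter]
  have := re_alt_loop_take k nums nums 0 (by simpa using List.length_filter_le _ _)
  simpa using this.symm
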